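-- pv_equiv track=rewrite | github.com/andreas-pattichis/Solving-the-Graph-Coloring-Problem-using-Genetic-Algorithms | dataset/graphs/dataset_transformation_script.py | transform_content
-- ===== SOURCE A (Python) =====
-- def transform_content(file_content):
--     lines = file_content.splitlines()
--     transformed_lines = []
--
--     # Extracting the header line and the edges
--     header = lines[0]
--     edges = lines[1:]
--
--     # Adding the header
--     transformed_lines.append(header)
--
--     # Collecting all unique node numbers
--     nodes = set()
--     for edge in edges:
--         _, node1, node2 = edge.split()
--         nodes.add(node1)
--         nodes.add(node2)
--
--     # Adding the node line in the desired format
--     nodes_list = sorted(nodes, key=int)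
--     transformed_lines.append("n " + " ".join(nodes_list))
--
--     # Adding the edges in the desired format
--     for edge in edges:
--         _, node1, node2 = edge.split()
--         transformed_lines.append(f"e {node1} {node2} 1")
--
--     return "\n".join(transformed_lines)
-- ===== SOURCE B (Python) =====
-- def transform_content(file_content):
--     lines = file_content.splitlines()
--     out = [lines[0], None]  # slot 1 is filled with the node line after the pass
--     by_value = {}           # int value -> node token
--     for edge in lines[1:]:
--         _, n1, n2 = edge.split()
--         by_value[int(n1)] = n1
--         by_value[int(n2)] = n2
--         out.append("e " + n1 + " " + n2 + " 1")
--     out[1] = "n " + " ".join(by_value[v] for v in sorted(by_value))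
--     return "\n".join(out)
-- ===== Notes on version B (the rewrite author's own statement) =====
-- stated objective: alternative
-- what changed: B replaces A's string set plus key=int sort and second re-splitting scan with an int-keyed dict index built in a single pass that also emits the edge lines into a placeholder-slotted output list; the node line comes from a plain integer sort of the dict keys read back through the index.
-- outside the precondition, e.g. on transform_content('p\ne 0 +0'): A returns 'p\nn 0 +0\ne 0 +0 1', B returns 'p\nn +0\ne 0 +0 1'
import Mathlib
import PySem

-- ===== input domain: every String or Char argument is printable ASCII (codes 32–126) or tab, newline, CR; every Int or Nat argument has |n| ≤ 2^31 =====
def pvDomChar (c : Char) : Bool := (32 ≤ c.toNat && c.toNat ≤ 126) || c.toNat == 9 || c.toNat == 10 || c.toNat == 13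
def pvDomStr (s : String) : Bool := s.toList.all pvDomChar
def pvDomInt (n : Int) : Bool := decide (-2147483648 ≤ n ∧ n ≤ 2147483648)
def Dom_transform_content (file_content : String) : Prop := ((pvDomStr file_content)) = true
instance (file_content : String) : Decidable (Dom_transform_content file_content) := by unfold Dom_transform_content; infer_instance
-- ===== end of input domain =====

-- B replaces A's string set + key=int sort + second re-splitting scan with an int-keyed dict
-- index built in one pass that also emits the edge lines into a placeholder-slotted output
-- list; the node line is a plain integer sort of the dict keys read back through the index.
-- Objective: alternative decomposition and data structure, same cost class.

-- ===== PORT A =====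
-- A-side helpers: the bodies of A's two 'for edge in edges' loops
def pvNodesStep (nodes : PySem.Set String) (edge : String) : PySem.Set String :=
  match PySem.Str.split₀ edge with
  | [_, node1, node2] => PySem.Set.add (PySem.Set.add nodes node1) node2
  | _ => nodes          -- Python raises ValueError here; excluded by Pre_

def pvEmitStep (acc : List String) (edge : String) : List String :=
  match PySem.Str.split₀ edge with
  | [_, node1, node2] => acc ++ ["e " ++ node1 ++ " " ++ node2 ++ " 1"]
  | _ => acc            -- Python raises ValueError here; excluded by Pre_

def transform_content (file_content : String) : String :=
  let lines := PySem.Str.splitlines file_content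
  let header := PySem.List.pyGetD lines 0 ""          -- lines[0]; lines = [] raises IndexError, excluded by Pre_
  let edges := PySem.List.slice lines (some 1) none   -- lines[1:]
  let transformed_lines := ([] : List String) ++ [header]
  let nodes := edges.foldl pvNodesStep PySem.Set.empty
  -- sorted(nodes, key=int); int(s) failing raises ValueError, excluded by Pre_
  let nodes_list := PySem.List.sorted nodes (fun s => (PySem.Int.ofStr? s).getD 0) false
  let transformed_lines := transformed_lines ++ ["n " ++ PySem.Str.join " " nodes_list]
  let transformed_lines := edges.foldl pvEmitStep transformed_lines
  PySem.Str.join "\n" transformed_lines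

-- ===== PORT B =====
-- B-side helper: the body of B's single loop over lines[1:]
def pvAltStep (st : PySem.Dict Int String × List String) (edge : String) :
    PySem.Dict Int String × List String :=
  match PySem.Str.split₀ edge with
  | [_, n1, n2] =>
      match PySem.Int.ofStr? n1, PySem.Int.ofStr? n2 with
      | some k1, some k2 =>
          ((st.1.insert k1 n1).insert k2 n2,
           st.2 ++ ["e " ++ n1 ++ " " ++ n2 ++ " 1"])
      | _, _ => st      -- int() raises ValueError here; excluded by Pre_
  | _ => st             -- unpacking edge.split() raises ValueError here; excluded by Pre_

def transform_content_alt (file_content : String) : String :=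
  let lines := PySem.Str.splitlines file_content
  -- out = [lines[0], None]; the placeholder None is modelled as "" (it is overwritten below)
  let out0 := [PySem.List.pyGetD lines 0 "", ""]
  let st := (PySem.List.slice lines (some 1) none).foldl pvAltStep (PySem.Dict.empty, out0)
  let node_line := "n " ++ PySem.Str.join " "
      ((PySem.List.sorted st.1.keys (fun k => k) false).map (fun k => st.1.getD k ""))
  PySem.Str.join "\n" (PySem.List.pySetD st.2 1 node_line)

-- ===== PRECONDITION & SPEC =====
-- Pre_ excludes: empty content (A raises IndexError), an edge line that does not split into
-- exactly 3 tokens or whose node tokens are not int-parseable (A raises ValueError), and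
-- distinct node tokens with equal int value, where sorted(set, key=int) breaks the tie by
-- CPython's set hash order, which no port can model (a defensible-corner artefact).
def Pre_transform_content (file_content : String) : Prop :=
  let lines := PySem.Str.splitlines file_content
  let edges := lines.drop 1
  let toks := edges.flatMap (fun e => (PySem.Str.split₀ e).drop 1)
  lines ≠ [] ∧
  (∀ e ∈ edges, (PySem.Str.split₀ e).length = 3) ∧
  (∀ t ∈ toks, (PySem.Int.ofStr? t).isSome = true) ∧
  (∀ s ∈ toks, ∀ t ∈ toks, PySem.Int.ofStr? s = PySem.Int.ofStr? t → s = t)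
instance (file_content : String) : Decidable (Pre_transform_content file_content) := by
  unfold Pre_transform_content; infer_instance

def pvWitness_transform_content : String := "p edge 2 1\ne 1 2\ne 2 3"

def Spec_transform_content (file_content : String) (out : String) : Prop :=
  out = transform_content_alt file_content
instance (file_content : String) (out : String) : Decidable (Spec_transform_content file_content out) := by
  unfold Spec_transform_content; infer_instance

-- ===== CLAIM (what is proved, stated in full; the proofs are below) =====
def Claim_equal_transform_content : Prop := ∀ (file_content : String), Dom_transform_content file_content → Pre_transform_content file_content → Spec_transform_content file_content (transform_content file_content)

-- ===== LEMMAS AND PROOFS =====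

-- the int key A sorts by
def pvKey (s : String) : Int := (PySem.Int.ofStr? s).getD 0

-- A's first loop is a fold of Set.add over the flattened node tokens
theorem pvNodes_fold (edges : List String)
    (h3 : ∀ e ∈ edges, (PySem.Str.split₀ e).length = 3) :
    ∀ (s : PySem.Set String),
      edges.foldl pvNodesStep s =
        (edges.flatMap (fun e => (PySem.Str.split₀ e).drop 1)).foldl PySem.Set.add s := by
  induction edges with
  | nil => intro s; rfl
  | cons e rest ih =>
      intro s
      have he := h3 e (by simp)
      rw [List.foldl_cons, List.flatMap_cons, List.foldl_append]
      rcases hs : PySem.Str.split₀ e with _ | ⟨a, _ | ⟨b, _ | ⟨c, _ | ⟨d, t⟩⟩⟩⟩ <;>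
        simp only [hs, List.length] at he <;> try omega
      rw [ih (fun x hx => h3 x (List.mem_cons_of_mem _ hx))]
      simp only [pvNodesStep, hs, List.drop, List.foldl_cons, List.foldl_nil]

-- B's loop: the dict component is a fold of insert over the flattened node tokens,
-- and the list component appends one formatted edge line per edge
theorem pvAlt_fold (edges : List String)
    (h3 : ∀ e ∈ edges, (PySem.Str.split₀ e).length = 3)
    (hsome : ∀ t ∈ edges.flatMap (fun e => (PySem.Str.split₀ e).drop 1),
      (PySem.Int.ofStr? t).isSome = true) :
    ∀ (d : PySem.Dict Int String) (acc : List String),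
      edges.foldl pvAltStep (d, acc) =
        ((edges.flatMap (fun e => (PySem.Str.split₀ e).drop 1)).foldl
            (fun d t => d.insert (pvKey t) t) d,
         edges.foldl pvEmitStep acc) := by
  induction edges with
  | nil => intro d acc; rfl
  | cons e rest ih =>
      intro d acc
      have he := h3 e (by simp)
      rw [List.foldl_cons, List.foldl_cons, List.flatMap_cons, List.foldl_append]
      rcases hs : PySem.Str.split₀ e with _ | ⟨a, _ | ⟨b, _ | ⟨c, _ | ⟨w, t⟩⟩⟩⟩ <;>
        simp only [hs, List.length] at he <;> try omega
      have hb : (PySem.Int.ofStr? b).isSome = true :=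
        hsome b (by rw [List.flatMap_cons]; exact List.mem_append_left _ (by simp [hs]))
      have hc : (PySem.Int.ofStr? c).isSome = true :=
        hsome c (by rw [List.flatMap_cons]; exact List.mem_append_left _ (by simp [hs]))
      obtain ⟨kb, hkb⟩ := Option.isSome_iff_exists.mp hb
      obtain ⟨kc, hkc⟩ := Option.isSome_iff_exists.mp hc
      rw [ih (fun x hx => h3 x (List.mem_cons_of_mem _ hx))
            (fun x hx => hsome x (by rw [List.flatMap_cons]; exact List.mem_append_right _ hx))]
      simp only [pvAltStep, pvEmitStep, hs, hkb, hkc, List.drop, List.foldl_cons, List.foldl_nil,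
        pvKey, Option.getD_some]

-- lookups survive a fold that never re-inserts the key
theorem pvDict_getD_skip (l : List String) :
    ∀ (d : PySem.Dict Int String) (k : Int), k ∉ l.map pvKey →
      (l.foldl (fun d t => d.insert (pvKey t) t) d).getD k "" = d.getD k "" := by
  induction l with
  | nil => intro d k _; rfl
  | cons t rest ih =>
      intro d k hk
      rw [List.foldl_cons, ih _ k (fun h => hk (by simp [h]))]
      exact PySem.Dict.getD_insert_of_ne _ _ _ (fun h => hk (by simp [h]))

-- lookup in the dict built by the insert fold inverts pvKey on the collected tokens
theorem pvDict_getD (toks : List String)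
    (hinj : ∀ s ∈ toks, ∀ t ∈ toks, PySem.Int.ofStr? s = PySem.Int.ofStr? t → s = t)
    (hsome : ∀ t ∈ toks, (PySem.Int.ofStr? t).isSome = true) :
    ∀ s ∈ toks,
      (toks.foldl (fun d t => d.insert (pvKey t) t) PySem.Dict.empty).getD (pvKey s) "" = s := by
  have key_inj : ∀ s ∈ toks, ∀ t ∈ toks, pvKey s = pvKey t → s = t := by
    intro s hs t ht h
    obtain ⟨a, ha⟩ := Option.isSome_iff_exists.mp (hsome s hs)
    obtain ⟨b, hb⟩ := Option.isSome_iff_exists.mp (hsome t ht)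
    exact hinj s hs t ht (by simp [pvKey, ha, hb] at h ⊢; omega)
  suffices h : ∀ (l : List String), (∀ x ∈ l, x ∈ toks) → ∀ (d : PySem.Dict Int String),
      ∀ s ∈ l, (l.foldl (fun d t => d.insert (pvKey t) t) d).getD (pvKey s) "" = s by
    exact h toks (fun _ hx => hx) PySem.Dict.empty
  intro l
  induction l with
  | nil => intro _ _ s hs; cases hs
  | cons t rest ih =>
      intro hsub d s hs
      rw [List.foldl_cons]
      rcases List.mem_cons.mp hs with hst | hsr
      · subst hst
        by_cases hm : s ∈ rest
        · exact ih (fun x hx => hsub x (List.mem_cons_of_mem _ hx)) _ s hm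
        · rw [pvDict_getD_skip rest _ (pvKey s) ?_]
          · exact PySem.Dict.getD_insert_self _ _ _ _
          · intro hk
            obtain ⟨u, hu, hku⟩ := List.mem_map.mp hk
            have := key_inj u (hsub u (List.mem_cons_of_mem _ hu)) s (hsub s (by simp)) hku
            exact hm (this ▸ hu)
      · exact ih (fun x hx => hsub x (List.mem_cons_of_mem _ hx)) _ s hsr

-- set(map f xs) = map f (set(xs)) for f injective on xs
theorem pvOfList_map (f : String → Int) :
    ∀ (xs : List String), (∀ s ∈ xs, ∀ t ∈ xs, f s = f t → s = t) →
      PySem.Set.ofList (xs.map f) = (PySem.Set.ofList xs).map f := by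
  intro xs
  induction xs using List.reverseRecOn with
  | nil => intro _; rfl
  | append_singleton xs x ih =>
      intro hinj
      rw [List.map_append, List.map_singleton, PySem.Set.ofList_append_singleton,
        PySem.Set.ofList_append_singleton,
        ih (fun s hs t ht h => hinj s (by simp [hs]) t (by simp [ht]) h),
        PySem.Set.add_eq_ite, PySem.Set.add_eq_ite]
      by_cases hx : x ∈ PySem.Set.ofList xs
      · rw [if_pos hx, if_pos (List.mem_map_of_mem hx)]
      · rw [if_neg hx, if_neg ?_, List.map_append, List.map_singleton]
        intro hfx
        obtain ⟨u, hu, hfu⟩ := List.mem_map.mp hfx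
        have hux : u = x :=
          hinj u (by simp [(PySem.Set.mem_ofList _ _).mp hu]) x (by simp) hfu
        exact hx (hux ▸ hu)

-- keys of the insert fold are the image of the node set under pvKey
theorem pvDict_keys (toks : List String)
    (hinj : ∀ s ∈ toks, ∀ t ∈ toks, PySem.Int.ofStr? s = PySem.Int.ofStr? t → s = t)
    (hsome : ∀ t ∈ toks, (PySem.Int.ofStr? t).isSome = true) :
    (toks.foldl (fun d t => d.insert (pvKey t) t) PySem.Dict.empty).keys =
      (PySem.Set.ofList toks).map pvKey := by
  have key_inj : ∀ s ∈ toks, ∀ t ∈ toks, pvKey s = pvKey t → s = t := by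
    intro s hs t ht h
    obtain ⟨a, ha⟩ := Option.isSome_iff_exists.mp (hsome s hs)
    obtain ⟨b, hb⟩ := Option.isSome_iff_exists.mp (hsome t ht)
    exact hinj s hs t ht (by simp [pvKey, ha, hb] at h ⊢; omega)
  rw [PySem.Dict.keys_foldl_insert_key, PySem.Dict.keys_empty,
    PySem.Set.update_nil_left, pvOfList_map pvKey toks key_inj]

-- the crux: B's integer sort read back through the dict IS A's keyed sort of the node set
theorem pvSorted_eq (toks : List String)
    (hinj : ∀ s ∈ toks, ∀ t ∈ toks, PySem.Int.ofStr? s = PySem.Int.ofStr? t → s = t)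
    (hsome : ∀ t ∈ toks, (PySem.Int.ofStr? t).isSome = true) :
    PySem.List.sorted (toks.foldl PySem.Set.add PySem.Set.empty) pvKey false =
      (PySem.List.sorted
          (toks.foldl (fun d t => d.insert (pvKey t) t) PySem.Dict.empty).keys
          (fun k => k) false).map
        (fun k => (toks.foldl (fun d t => d.insert (pvKey t) t) PySem.Dict.empty).getD k "") := by
  have hN : toks.foldl PySem.Set.add PySem.Set.empty = PySem.Set.ofList toks :=
    (PySem.Set.ofList_eq_foldl toks).symm
  have hget := pvDict_getD toks hinj hsome
  have key_inj : ∀ s ∈ toks, ∀ t ∈ toks, pvKey s = pvKey t → s = t := by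
    intro s hs t ht h
    obtain ⟨a, ha⟩ := Option.isSome_iff_exists.mp (hsome s hs)
    obtain ⟨b, hb⟩ := Option.isSome_iff_exists.mp (hsome t ht)
    exact hinj s hs t ht (by simp [pvKey, ha, hb] at h ⊢; omega)
  rw [hN, pvDict_keys toks hinj hsome]
  set D := toks.foldl (fun d t => d.insert (pvKey t) t) PySem.Dict.empty with hD
  set N := PySem.Set.ofList toks with hNdef
  have hnodupN : N.Nodup := PySem.Set.nodup_ofList toks
  have hkeyinjN : ∀ s ∈ N, ∀ t ∈ N, pvKey s = pvKey t → s = t := by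
    intro s hs t ht
    exact key_inj s ((PySem.Set.mem_ofList _ _).mp hs) t ((PySem.Set.mem_ofList _ _).mp ht)
  have hnodupK : (N.map pvKey).Nodup := hnodupN.map_on hkeyinjN
  set ys := PySem.List.sorted (N.map pvKey) (fun k => k) false with hys
  have hysperm : ys.Perm (N.map pvKey) := PySem.List.sorted_perm _ _ _
  have hysnodup : ys.Nodup := hysperm.nodup_iff.mpr hnodupK
  have hyslt : ys.Pairwise (· < ·) :=
    ((PySem.List.sorted_pairwise (N.map pvKey) (fun k => k)).and hysnodup).imp
      (fun h => lt_of_le_of_ne h.1 h.2)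
  have hmem_ys : ∀ k ∈ ys, D.getD k "" ∈ N ∧ pvKey (D.getD k "") = k := by
    intro k hk
    obtain ⟨s, hs, hks⟩ := List.mem_map.mp (hysperm.mem_iff.mp hk)
    have hst : s ∈ toks := (PySem.Set.mem_ofList _ _).mp hs
    have : D.getD k "" = s := hks ▸ hget s hst
    rw [this]
    exact ⟨hs, hks⟩
  have hzsperm : (ys.map (fun k => D.getD k "")).Perm N := by
    have h2 : (N.map pvKey).map (fun k => D.getD k "") = N := by
      rw [List.map_map]
      have hpt : ∀ s ∈ N, ((fun k => D.getD k "") ∘ pvKey) s = s := by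
        intro s hs
        exact hget s ((PySem.Set.mem_ofList _ _).mp hs)
      rw [List.map_congr_left hpt]
      simp
    exact h2 ▸ hysperm.map (fun k => D.getD k "")
  have hzslt : (ys.map (fun k => D.getD k "")).Pairwise
      (fun a b => pvKey a < pvKey b) := by
    rw [List.pairwise_map]
    refine hyslt.imp_of_mem ?_
    intro a b ha hb hab
    rw [(hmem_ys a ha).2, (hmem_ys b hb).2]
    exact hab
  exact PySem.List.sorted_eq_of_perm_of_pairwise_lt _ _ _ hzsperm hzslt

-- A's second loop only appends: a fixed prefix of the accumulator passes through
theorem pvEmit_cons (edges : List String) :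
    ∀ (x : String) (acc : List String),
      edges.foldl pvEmitStep (x :: acc) = x :: edges.foldl pvEmitStep acc := by
  induction edges with
  | nil => intro x acc; rfl
  | cons e rest ih =>
      intro x acc
      simp only [List.foldl_cons, pvEmitStep]
      rcases hs : PySem.Str.split₀ e with _ | ⟨a, _ | ⟨b, _ | ⟨c, _ | ⟨d, t⟩⟩⟩⟩ <;>
        simp [ih]

-- ===== VERDICT (by name: the statement is the Claim_ definition above) =====
theorem transform_content_spec : Claim_equal_transform_content := by
  intro file_content _ hpre
  obtain ⟨hne, h3, hsome, hinj⟩ := hpre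
  simp only [Spec_transform_content, transform_content, transform_content_alt,
    PySem.List.slice_from_one, List.nil_append]
  rw [← List.drop_one (l := PySem.Str.splitlines file_content)]
  rw [pvAlt_fold _ h3 hsome, pvNodes_fold _ h3]
  rw [show (fun s => (PySem.Int.ofStr? s).getD 0) = pvKey from rfl]
  rw [pvSorted_eq _ hinj hsome]
  simp only [List.cons_append, List.nil_append, pvEmit_cons]
  simp [PySem.List.pySetD, PySem.List.pySet?, PySem.List.pyIdx?, List.set]
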